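-- pv_equiv track=rewrite | github.com/fagostini/BioMate | src/biomate/index/index.py | expand_regex
-- ===== SOURCE A (Python) =====
-- from itertools import product
--
-- def expand_regex(string: str) -> set[str]:
--     """Expand a regex into all its string (genomic) patterns."""
--     elements_list = []
--     i = 0
--     while i < len(string):
--         c = string[i]
--         if c == "." or c == "*":
--             elements_list.append(["A", "C", "G", "T", "N"])
--         elif c == "[":
--             i += 1
--             c = string[i]
--             sublist = []
--             while c != "]" and i < len(string):
--                 sublist.append(string[i])
--                 i += 1
--                 c = string[i]
--             elements_list.append(sublist)
--         elif c == "(":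
--             i += 1
--             c = string[i]
--             sublist = []
--             substring = ""
--             while c != ")" and i < len(string):
--                 if c == "|":
--                     sublist.append(substring)
--                     substring = ""
--                 else:
--                     substring += string[i]
--                 i += 1
--                 c = string[i]
--             sublist.append(substring)
--             if string[i + 1] == "?":
--                 sublist.append("")
--                 i += 1
--             elements_list.append(sublist)
--         elif c == "+":
--             raise ValueError(
--                 "The '+' character is currently not supported in the regex patterns is not supported!"
--             )
--         else:
--             elements_list.append([string[i]])
--         i += 1
--     return set("".join(x) for x in product(*elements_list))
-- ===== SOURCE B (Python) =====
-- def expand_regex(string: str) -> set[str]: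
--     """Expand a regex into all its string (genomic) patterns (streaming, no itertools)."""
--     result = {""}
--     i = 0
--     n = len(string)
--     while i < n:
--         c = string[i]
--         if c == "." or c == "*":
--             options = ["A", "C", "G", "T", "N"]
--             i += 1
--         elif c == "[":
--             j = string.index("]", i + 1)
--             options = list(string[i + 1:j])
--             i = j + 1
--         elif c == "(":
--             j = string.index(")", i + 1)
--             options = string[i + 1:j].split("|")
--             i = j + 1
--             if i < n and string[i] == "?":
--                 options.append("")
--                 i += 1
--         elif c == "+":
--             raise ValueError(
--                 "The '+' character is currently not supported in the regex patterns is not supported!"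
--             )
--         else:
--             options = [c]
--             i += 1
--         result = {prefix + opt for prefix in result for opt in options}
--     return result
-- ===== Notes on version B (the rewrite author's own statement) =====
-- stated objective: alternative
-- what changed: Instead of collecting per-token option lists and taking one itertools.product pass at the end, B scans with index jumps (str.index to the closing bracket, slicing and splitting the group body on the alternation bar) and folds each token's options into a running result set immediately, fusing parsing and generation into one streaming pass.
import Mathlib
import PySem

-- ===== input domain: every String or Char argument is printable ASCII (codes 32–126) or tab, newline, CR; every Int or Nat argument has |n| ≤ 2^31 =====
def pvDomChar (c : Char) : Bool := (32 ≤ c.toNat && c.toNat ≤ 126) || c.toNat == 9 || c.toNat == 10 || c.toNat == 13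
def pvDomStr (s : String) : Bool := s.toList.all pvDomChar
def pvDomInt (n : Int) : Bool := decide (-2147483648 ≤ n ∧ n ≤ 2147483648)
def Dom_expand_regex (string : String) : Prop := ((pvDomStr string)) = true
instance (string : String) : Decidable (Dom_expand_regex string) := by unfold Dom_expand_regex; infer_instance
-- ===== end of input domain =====

-- B replaces A's two-phase collect-then-itertools.product with a single streaming pass
-- (index jumps to the closing bracket, slicing and splitting the group body) that folds each token's options
-- into a running result set immediately; equivalence of the returned value is proved on Pre_.

-- needed by the ports' termination proofs
theorem dropWhile_tail_lt (p : Char → Bool) (rest : List Char) {x : Char} {r : List Char}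
    (h : rest.dropWhile p = x :: r) : r.length < rest.length := by
  have := List.length_dropWhile_le p rest
  rw [h] at this
  simp only [List.length_cons] at this
  omega

-- ===== PORT A =====
-- A's inner '[' loop: collect chars until ']'; none = IndexError on an unterminated bracket.
def scanBr : List Char → Option (List (List Char) × List Char)
  | [] => none
  | c :: rest =>
    if c = ']' then some ([], rest)
    else
      match scanBr rest with
      | none => none
      | some (l, r) => some ([c] :: l, r)

-- A's inner '(' loop: alternatives split on '|' until ')'; none = IndexError on an unterminated group.
def scanGr : List Char → List Char → Option (List (List Char) × List Char)
  | [], _ => none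
  | c :: rest, cur =>
    if c = ')' then some ([cur], rest)
    else if c = '|' then
      match scanGr rest [] with
      | none => none
      | some (l, r) => some (cur :: l, r)
    else scanGr rest (cur ++ [c])

-- needed by parseA's termination
theorem scanBr_length : ∀ l t r, scanBr l = some (t, r) → r.length < l.length := by
  intro l
  induction l with
  | nil => intro t r h; simp [scanBr] at h
  | cons c rest ih =>
    intro t r h
    simp only [scanBr] at h
    split at h
    · simp only [Option.some.injEq, Prod.mk.injEq] at h
      obtain ⟨h1, h2⟩ := h
      subst h2
      simp only [List.length_cons]
      omega
    · cases hr : scanBr rest with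
      | none => rw [hr] at h; simp at h
      | some p =>
        rw [hr] at h
        obtain ⟨l', r'⟩ := p
        simp only [Option.some.injEq, Prod.mk.injEq] at h
        obtain ⟨h1, h2⟩ := h
        subst h2
        have := ih l' r' hr
        simp only [List.length_cons]
        omega

-- needed by parseA's termination
theorem scanGr_length : ∀ l cur t r, scanGr l cur = some (t, r) → r.length < l.length := by
  intro l
  induction l with
  | nil => intro cur t r h; simp [scanGr] at h
  | cons c rest ih =>
    intro cur t r h
    simp only [scanGr] at h
    split at h
    · simp only [Option.some.injEq, Prod.mk.injEq] at h
      obtain ⟨h1, h2⟩ := h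
      subst h2
      simp only [List.length_cons]
      omega
    · split at h
      · cases hr : scanGr rest [] with
        | none => rw [hr] at h; simp at h
        | some p =>
          rw [hr] at h
          obtain ⟨l', r'⟩ := p
          simp only [Option.some.injEq, Prod.mk.injEq] at h
          obtain ⟨h1, h2⟩ := h
          subst h2
          have := ih [] l' r' hr
          simp only [List.length_cons]
          omega
      · have := ih (cur ++ [c]) t r h
        simp only [List.length_cons]
        omega

-- the option list for '.' and '*'
def wildT : List (List Char) := [['A'], ['C'], ['G'], ['T'], ['N']]

-- A's outer while loop, building elements_list; none = ValueError on '+' or IndexError.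
def parseA : List Char → Option (List (List (List Char)))
  | [] => some []
  | c :: rest =>
    if c = '.' ∨ c = '*' then
      match parseA rest with
      | none => none
      | some toks => some (wildT :: toks)
    else if c = '[' then
      match h : scanBr rest with
      | none => none
      | some (t, r) =>
        match parseA r with
        | none => none
        | some toks => some (t :: toks)
    else if c = '(' then
      match h : scanGr rest [] with
      | none => none
      | some (t, r) =>
        match r with
        | [] => none
        | '?' :: r' =>
          match parseA r' with
          | none => none
          | some toks => some ((t ++ [[]]) :: toks)
        | d :: r' =>
          match parseA (d :: r') with
          | none => none
          | some toks => some (t :: toks)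
    else if c = '+' then none
    else
      match parseA rest with
      | none => none
      | some toks => some ([[c]] :: toks)
termination_by l => l.length
decreasing_by
  all_goals
    first
    | (simp only [List.length_cons]; omega)
    | (have := scanBr_length rest _ _ h
       simp only [List.length_cons] at this ⊢
       omega)
    | (have := scanGr_length rest [] _ _ h
       simp only [List.length_cons] at this ⊢
       omega)

-- set("".join(x) for x in product(*elements_list)) : product in tuple order, join, dedup
def expand_regex (string : String) : List String :=
  match parseA string.toList with
  | some toks =>
    PySem.Set.ofList
      ((toks.foldl (fun acc opts => acc.flatMap (fun p => opts.map (fun o => p ++ o))) [[]]).map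
        String.ofList)
  | none => []

-- ===== PORT B =====
-- one fused update: result = {prefix + opt for prefix in result for opt in options}
def stepB (res opts : List (List Char)) : List (List Char) :=
  PySem.List.dedup (res.flatMap (fun p => opts.map (fun o => p ++ o)))

-- port of str.split on the alternation bar (exact for a one-character separator)
def splitBarL : List Char → List (List Char)
  | [] => [[]]
  | c :: r =>
    if c = '|' then [] :: splitBarL r
    else
      match splitBarL r with
      | [] => [[c]]
      | h :: t => (c :: h) :: t

-- B's while loop: jump to the closing bracket, fold the options in at once; none = B raises
def loopB : List Char → List (List Char) → Option (List (List Char))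
  | [], res => some res
  | c :: rest, res =>
    if c = '.' ∨ c = '*' then loopB rest (stepB res [['A'], ['C'], ['G'], ['T'], ['N']])
    else if c = '[' then
      match h : rest.dropWhile (· ≠ ']') with
      | [] => none
      | _ :: r => loopB r (stepB res ((rest.takeWhile (· ≠ ']')).map (fun x => [x])))
    else if c = '(' then
      match h : rest.dropWhile (· ≠ ')') with
      | [] => none
      | _ :: '?' :: r' => loopB r' (stepB res (splitBarL (rest.takeWhile (· ≠ ')')) ++ [[]]))
      | _ :: r => loopB r (stepB res (splitBarL (rest.takeWhile (· ≠ ')'))))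
    else if c = '+' then none
    else loopB rest (stepB res [[c]])
termination_by l _ => l.length
decreasing_by
  all_goals
    first
    | (simp only [List.length_cons]; omega)
    | (have := dropWhile_tail_lt _ rest h
       simp only [List.length_cons] at this ⊢
       all_goals omega)

def expand_regex_alt (string : String) : List String :=
  match loopB string.toList [[]] with
  | some res => res.map String.ofList
  | none => []

-- ===== PRECONDITION & SPEC =====
-- Pre_ excludes exactly the inputs on which A raises: a top-level '+' (ValueError), an
-- unterminated '[' or '(' (IndexError), and a '(...)' group whose ')' is the last character
-- (A peeks at string[i+1] there, IndexError).
inductive PMode : Type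
  | normal
  | inBr
  | inGr
  | afterGr
deriving DecidableEq, Repr

def wfAux : List Char → PMode → Bool
  | [], m => match m with
    | .normal => true
    | _ => false
  | c :: rest, .normal =>
    if c = '+' then false
    else if c = '[' then wfAux rest .inBr
    else if c = '(' then wfAux rest .inGr
    else wfAux rest .normal
  | c :: rest, .inBr => if c = ']' then wfAux rest .normal else wfAux rest .inBr
  | c :: rest, .inGr => if c = ')' then wfAux rest .afterGr else wfAux rest .inGr
  | c :: rest, .afterGr =>
    if c = '?' then wfAux rest .normal
    else if c = '+' then false
    else if c = '[' then wfAux rest .inBr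
    else if c = '(' then wfAux rest .inGr
    else wfAux rest .normal

def Pre_expand_regex (string : String) : Prop := wfAux string.toList PMode.normal = true
instance (string : String) : Decidable (Pre_expand_regex string) := by
  unfold Pre_expand_regex; infer_instance

def pvWitness_expand_regex : String := "(A|C)?G"

def Spec_expand_regex (string : String) (out : List String) : Prop := out = expand_regex_alt string
instance (string : String) (out : List String) : Decidable (Spec_expand_regex string out) := by
  unfold Spec_expand_regex; infer_instance

-- ===== CLAIM (what is proved, stated in full; the proofs are below) =====
def Claim_equal_expand_regex : Prop :=
  ∀ (string : String), Dom_expand_regex string → Pre_expand_regex string →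
    Spec_expand_regex string (expand_regex string)

-- ===== LEMMAS AND PROOFS =====

-- the product step A folds with (named for the proofs; definitionally the lambda in expand_regex)
def pstep (acc opts : List (List Char)) : List (List Char) :=
  acc.flatMap (fun p => opts.map (fun o => p ++ o))

theorem ofList_append_singleton {α : Type} [BEq α] (L : List α) (a : α) :
    PySem.Set.ofList (L ++ [a]) = PySem.Set.add (PySem.Set.ofList L) a := by
  simp [PySem.Set.ofList, List.foldl_append]

theorem ofList_append {α : Type} [BEq α] (L M : List α) :
    PySem.Set.ofList (L ++ M) = M.foldl PySem.Set.add (PySem.Set.ofList L) := by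
  simp [PySem.Set.ofList, List.foldl_append]

theorem foldl_add_absorb {α : Type} [BEq α] [LawfulBEq α] : ∀ (m s : List α), (∀ x ∈ m, x ∈ s) →
    m.foldl PySem.Set.add s = s := by
  intro m
  induction m with
  | nil => intro s _; rfl
  | cons x m ih =>
    intro s hsub
    have hx : x ∈ s := hsub x (by simp)
    have hadd : PySem.Set.add s x = s := by
      simp only [PySem.Set.add, PySem.Set.contains]
      rw [if_pos (List.elem_eq_true_of_mem hx)]
    simp only [List.foldl_cons, hadd]
    exact ih s (fun y hy => hsub y (by simp [hy]))

theorem key_dedup (f : List Char → List (List Char)) : ∀ L : List (List Char),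
    PySem.Set.ofList ((PySem.Set.ofList L).flatMap f) = PySem.Set.ofList (L.flatMap f) := by
  intro L
  induction L using List.reverseRecOn with
  | nil => rfl
  | append_singleton L a ih =>
    rw [ofList_append_singleton]
    by_cases hmem : a ∈ PySem.Set.ofList L
    · have hadd : PySem.Set.add (PySem.Set.ofList L) a = PySem.Set.ofList L := by
        simp [PySem.Set.add, PySem.Set.contains]
        exact (PySem.Set.mem_ofList L a).mp hmem
      rw [hadd, ih, List.flatMap_append, ofList_append]
      refine (foldl_add_absorb _ _ ?_).symm
      intro x hx
      rw [PySem.Set.mem_ofList]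
      simp only [List.flatMap_singleton] at hx
      exact List.mem_flatMap.mpr ⟨a, (PySem.Set.mem_ofList L a).mp hmem, hx⟩
    · have hadd : PySem.Set.add (PySem.Set.ofList L) a = PySem.Set.ofList L ++ [a] := by
        simp only [PySem.Set.add, PySem.Set.contains]
        rw [if_neg]
        simp [hmem]
      rw [hadd, List.flatMap_append, ofList_append, List.flatMap_append, ofList_append,
        List.flatMap_singleton, ih]

theorem stepB_ofList (L opts : List (List Char)) :
    stepB (PySem.Set.ofList L) opts = PySem.Set.ofList (pstep L opts) := by
  rw [stepB, PySem.List.dedup_eq_ofList, pstep]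
  exact key_dedup (fun p => opts.map (fun o => p ++ o)) L

theorem foldTok : ∀ (toks : List (List (List Char))) (L : List (List Char)),
    toks.foldl stepB (PySem.Set.ofList L) = PySem.Set.ofList (toks.foldl pstep L) := by
  intro toks
  induction toks with
  | nil => intro L; rfl
  | cons t toks ih =>
    intro L
    simp only [List.foldl_cons, stepB_ofList]
    exact ih (pstep L t)

theorem ofList_map_ofListChar : ∀ l : List (List Char),
    PySem.Set.ofList (l.map String.ofList) = (PySem.Set.ofList l).map String.ofList := by
  intro l
  induction l using List.reverseRecOn with
  | nil => rfl
  | append_singleton L a ih =>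
    rw [List.map_append, List.map_singleton, ofList_append_singleton, ofList_append_singleton, ih]
    by_cases hmem : a ∈ PySem.Set.ofList L
    · have h1 : PySem.Set.add (PySem.Set.ofList L) a = PySem.Set.ofList L := by
        simp only [PySem.Set.add, PySem.Set.contains]
        rw [if_pos (List.elem_eq_true_of_mem hmem)]
      have h2 : PySem.Set.add ((PySem.Set.ofList L).map String.ofList) (String.ofList a) =
          (PySem.Set.ofList L).map String.ofList := by
        simp only [PySem.Set.add, PySem.Set.contains]
        rw [if_pos (List.elem_eq_true_of_mem (List.mem_map_of_mem hmem))]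
      rw [h1, h2]
    · have hmem' : String.ofList a ∉ (PySem.Set.ofList L).map String.ofList := by
        intro hx
        obtain ⟨y, hy, hxy⟩ := List.mem_map.mp hx
        exact hmem (String.ofList_inj.mp hxy ▸ hy)
      have h1 : PySem.Set.add (PySem.Set.ofList L) a = PySem.Set.ofList L ++ [a] := by
        simp only [PySem.Set.add, PySem.Set.contains]
        rw [if_neg]
        simp [hmem]
      have h2 : PySem.Set.add ((PySem.Set.ofList L).map String.ofList) (String.ofList a) =
          (PySem.Set.ofList L).map String.ofList ++ [String.ofList a] := by
        simp only [PySem.Set.add, PySem.Set.contains]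
        rw [if_neg]
        simp [hmem']
      rw [h1, h2, List.map_append, List.map_singleton]

-- parse agreement
theorem scanBr_eq : ∀ l : List Char, ']' ∈ l →
    scanBr l = some ((l.takeWhile (· ≠ ']')).map (fun c => [c]), (l.dropWhile (· ≠ ']')).tail) := by
  intro l
  induction l with
  | nil => intro h; simp at h
  | cons c rest ih =>
    intro hmem
    by_cases hc : c = ']'
    · subst hc
      simp [scanBr, List.takeWhile_cons, List.dropWhile_cons]
    · have hm : ']' ∈ rest := by
        rcases List.mem_cons.mp hmem with h | h
        · exact absurd h.symm hc
        · exact h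
      simp only [scanBr]
      rw [if_neg hc, ih hm]
      simp [List.takeWhile_cons, List.dropWhile_cons, hc]

def mapHead (f : List Char → List Char) : List (List Char) → List (List Char)
  | [] => []
  | h :: t => f h :: t

theorem splitBarL_ne_nil : ∀ l : List Char, splitBarL l ≠ [] := by
  intro l
  cases l with
  | nil => simp [splitBarL]
  | cons c r =>
    simp only [splitBarL]
    split
    · simp
    · split <;> simp

theorem mapHead_nil_append' (xs : List (List Char)) :
    mapHead (fun x => ([] : List Char) ++ x) xs = xs := by
  cases xs <;> simp [mapHead]

theorem scanGr_eq : ∀ l cur, ')' ∈ l →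
    scanGr l cur = some (mapHead (cur ++ ·) (splitBarL (l.takeWhile (· ≠ ')'))),
      (l.dropWhile (· ≠ ')')).tail) := by
  intro l
  induction l with
  | nil => intro cur h; simp at h
  | cons c rest ih =>
    intro cur hmem
    by_cases hc : c = ')'
    · subst hc
      simp [scanGr, List.takeWhile_cons, List.dropWhile_cons, splitBarL, mapHead]
    · have hm : ')' ∈ rest := by
        rcases List.mem_cons.mp hmem with h | h
        · exact absurd h.symm hc
        · exact h
      by_cases hb : c = '|'
      · subst hb
        simp only [scanGr]
        rw [if_pos trivial, ih [] hm]
        simp [List.takeWhile_cons, List.dropWhile_cons, splitBarL, mapHead,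
          mapHead_nil_append']
        cases splitBarL (List.takeWhile (fun x => !decide (x = ')')) rest) <;> rfl
      · simp only [scanGr]
        rw [if_neg hc, if_neg hb, ih (cur ++ [c]) hm]
        have htw : (c :: rest).takeWhile (· ≠ ')') = c :: rest.takeWhile (· ≠ ')') := by
          simp [List.takeWhile_cons, hc]
        have hdw : (c :: rest).dropWhile (· ≠ ')') = rest.dropWhile (· ≠ ')') := by
          simp [List.dropWhile_cons, hc]
        rw [htw, hdw]
        cases hsb : splitBarL (rest.takeWhile (· ≠ ')')) with
        | nil => exact absurd hsb (splitBarL_ne_nil _)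
        | cons h t =>
          simp only [splitBarL]
          rw [if_neg hb, hsb]
          simp [mapHead]

theorem mem_of_dropWhile_ne_cons {a x : Char} {r : List Char} : ∀ {l : List Char},
    l.dropWhile (· ≠ a) = x :: r → a ∈ l := by
  intro l
  induction l with
  | nil => intro h; simp [List.dropWhile] at h
  | cons b t ih =>
    intro h
    by_cases hb : b = a
    · simp [hb]
    · rw [List.dropWhile_cons_of_pos (by simp [hb])] at h
      exact List.mem_cons_of_mem _ (ih h)

theorem wfAux_inBr : ∀ l : List Char, wfAux l .inBr = true →
    ∃ r, l.dropWhile (· ≠ ']') = ']' :: r ∧ wfAux r .normal = true := by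
  intro l
  induction l with
  | nil => intro h; simp [wfAux] at h
  | cons c rest ih =>
    intro h
    by_cases hc : c = ']'
    · subst hc
      rw [wfAux, if_pos rfl] at h
      exact ⟨rest, by simp [List.dropWhile_cons], h⟩
    · rw [wfAux, if_neg hc] at h
      obtain ⟨r, hdrop, hr⟩ := ih h
      exact ⟨r, by rw [List.dropWhile_cons_of_pos (by simp [hc])]; exact hdrop, hr⟩

theorem wfAux_inGr : ∀ l : List Char, wfAux l .inGr = true →
    ∃ r, l.dropWhile (· ≠ ')') = ')' :: r ∧ wfAux r .afterGr = true := by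
  intro l
  induction l with
  | nil => intro h; simp [wfAux] at h
  | cons c rest ih =>
    intro h
    by_cases hc : c = ')'
    · subst hc
      rw [wfAux, if_pos rfl] at h
      exact ⟨rest, by simp [List.dropWhile_cons], h⟩
    · rw [wfAux, if_neg hc] at h
      obtain ⟨r, hdrop, hr⟩ := ih h
      exact ⟨r, by rw [List.dropWhile_cons_of_pos (by simp [hc])]; exact hdrop, hr⟩

theorem wfAux_afterGr_ne (c : Char) (r : List Char) (h : ¬ c = '?') :
    wfAux (c :: r) PMode.afterGr = wfAux (c :: r) PMode.normal := by
  rw [wfAux, wfAux, if_neg h]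

theorem agree : ∀ (n : Nat) (cs : List Char), cs.length ≤ n → wfAux cs PMode.normal = true →
    ∃ toks, parseA cs = some toks ∧
      ∀ res, loopB cs res = some (toks.foldl stepB res) := by
  intro n
  induction n with
  | zero =>
    intro cs hlen _
    have hnil : cs = [] := List.eq_nil_of_length_eq_zero (Nat.le_zero.mp hlen)
    subst hnil
    exact ⟨[], by simp [parseA], fun res => by simp [loopB]⟩
  | succ n ih =>
    intro cs hlen hwf
    cases cs with
    | nil => exact ⟨[], by simp [parseA], fun res => by simp [loopB]⟩
    | cons c rest =>
      have hlen' : rest.length ≤ n := by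
        simp only [List.length_cons] at hlen; omega
      by_cases hdot : c = '.' ∨ c = '*'
      · have hc1 : ¬ c = '+' := by rcases hdot with rfl | rfl <;> decide
        have hc2 : ¬ c = '[' := by rcases hdot with rfl | rfl <;> decide
        have hc3 : ¬ c = '(' := by rcases hdot with rfl | rfl <;> decide
        rw [wfAux, if_neg hc1, if_neg hc2, if_neg hc3] at hwf
        obtain ⟨toks, hp, hl⟩ := ih rest hlen' hwf
        refine ⟨wildT :: toks, ?_, ?_⟩
        · rw [parseA, if_pos hdot, hp]
        · intro res
          rw [loopB, if_pos hdot]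
          simpa [wildT, List.foldl_cons] using hl (stepB res wildT)
      · by_cases hbr : c = '['
        · subst hbr
          rw [wfAux, if_neg (by decide), if_pos rfl] at hwf
          obtain ⟨r, hd, hwf⟩ := wfAux_inBr rest hwf
          · have hmem : ']' ∈ rest := mem_of_dropWhile_ne_cons hd
            have hlt : r.length ≤ n := by
              have := dropWhile_tail_lt _ rest hd; omega
            obtain ⟨toks, hp, hl⟩ := ih r hlt hwf
            have hbr_eq := scanBr_eq rest hmem
            rw [hd] at hbr_eq
            simp only [List.tail_cons] at hbr_eq
            refine ⟨(rest.takeWhile (· ≠ ']')).map (fun c => [c]) :: toks, ?_, ?_⟩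
            · rw [parseA, if_neg (by decide), if_pos rfl]
              split
              · rename_i heq; rw [hbr_eq] at heq; cases heq
              · rename_i t' r' heq
                rw [hbr_eq] at heq
                cases heq
                simp only [hp]
            · intro res
              rw [loopB, if_neg (by decide), if_pos rfl]
              split
              · rename_i heq; rw [hd] at heq; cases heq
              · rename_i x' r' heq
                rw [hd] at heq
                cases heq
                simp only [List.foldl_cons]
                exact hl _
        · by_cases hpar : c = '('
          · subst hpar
            rw [wfAux, if_neg (by decide), if_neg (by decide), if_pos rfl] at hwf
            obtain ⟨r0, hd0, hafter⟩ := wfAux_inGr rest hwf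
            cases r0 with
            | nil => simp [wfAux] at hafter
            | cons d r =>
            by_cases hq' : d = '?'
            · -- dropWhile = ')' :: '?' :: r
              subst hq'
              rw [wfAux, if_pos rfl] at hafter
              have hwf := hafter
              have hd : rest.dropWhile (· ≠ ')') = ')' :: '?' :: r := hd0
              have hmem : ')' ∈ rest := mem_of_dropWhile_ne_cons hd
              have hlt : r.length ≤ n := by
                have := dropWhile_tail_lt _ rest hd
                simp only [List.length_cons] at this; omega
              obtain ⟨toks, hp, hl⟩ := ih r hlt hwf
              have hGr := scanGr_eq rest [] hmem
              rw [hd, mapHead_nil_append'] at hGr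
              simp only [List.tail_cons] at hGr
              refine ⟨(splitBarL (rest.takeWhile (· ≠ ')')) ++ [[]]) :: toks, ?_, ?_⟩
              · rw [parseA, if_neg (by decide), if_neg (by decide), if_pos rfl]
                split
                · rename_i heq; rw [hGr] at heq; cases heq
                · rename_i t' r' heq
                  rw [hGr] at heq
                  simp at heq
                  obtain ⟨h1, h2⟩ := heq
                  subst h1; subst h2
                  simp only [hp, ne_eq, decide_not]
              · intro res
                rw [loopB, if_neg (by decide), if_neg (by decide), if_pos rfl]
                split
                · rename_i heq; rw [hd] at heq; cases heq
                · rename_i x' r' heq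
                  rw [hd] at heq
                  cases heq
                  simp only [List.foldl_cons]
                  exact hl _
                · rename_i hno heq
                  rw [hd] at heq
                  cases heq
                  exact (hno r rfl).elim
            · -- dropWhile = ')' :: d :: r with d ≠ '?'
              rw [wfAux_afterGr_ne d r hq'] at hafter
              have hwf := hafter
              have hq : ¬ d = '?' := hq'
              have hd : rest.dropWhile (· ≠ ')') = ')' :: d :: r := hd0
              have hmem : ')' ∈ rest := mem_of_dropWhile_ne_cons hd
              have hlt : (d :: r).length ≤ n := by
                have := dropWhile_tail_lt _ rest hd
                simp only [List.length_cons] at this ⊢; omega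
              obtain ⟨toks, hp, hl⟩ := ih (d :: r) hlt hwf
              have hGr := scanGr_eq rest [] hmem
              rw [hd, mapHead_nil_append'] at hGr
              simp only [List.tail_cons] at hGr
              refine ⟨splitBarL (rest.takeWhile (· ≠ ')')) :: toks, ?_, ?_⟩
              · rw [parseA, if_neg (by decide), if_neg (by decide), if_pos rfl]
                split
                · rename_i heq; rw [hGr] at heq; cases heq
                · rename_i t' r' heq
                  rw [hGr] at heq
                  simp at heq
                  obtain ⟨h1, h2⟩ := heq
                  subst h1; subst h2
                  split
                  · rename_i heq2 hHeq
                    cases heq2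
                  · rename_i heq2 hHeq
                    cases heq2
                    exact absurd rfl hq
                  · rename_i heq2 hHeq
                    cases heq2
                    simp only [hp, ne_eq, decide_not]
              · intro res
                rw [loopB, if_neg (by decide), if_neg (by decide), if_pos rfl]
                split
                · rename_i heq; rw [hd] at heq; cases heq
                · rename_i x' r' heq
                  rw [hd] at heq
                  cases heq
                  exact absurd rfl hq
                · rename_i hno heq
                  rw [hd] at heq
                  cases heq
                  simp only [List.foldl_cons]
                  exact hl _
          · by_cases hplus : c = '+'
            · rw [wfAux, if_pos hplus] at hwf
              simp at hwf
            · rw [wfAux, if_neg hplus, if_neg hbr, if_neg hpar] at hwf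
              obtain ⟨toks, hp, hl⟩ := ih rest hlen' hwf
              refine ⟨[[c]] :: toks, ?_, ?_⟩
              · rw [parseA, if_neg hdot, if_neg hbr, if_neg hpar, if_neg hplus, hp]
              · intro res
                rw [loopB, if_neg hdot, if_neg hbr, if_neg hpar, if_neg hplus,
                  hl (stepB res [[c]]), List.foldl_cons]

-- ===== VERDICT (by name: the statement is the Claim_ definition above) =====
theorem expand_regex_spec : Claim_equal_expand_regex := by
  intro s _ hpre
  unfold Spec_expand_regex expand_regex expand_regex_alt
  obtain ⟨toks, hA, hB⟩ := agree s.toList.length s.toList le_rfl hpre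
  rw [hA, hB [[]]]
  show PySem.Set.ofList ((toks.foldl pstep [[]]).map String.ofList)
      = (toks.foldl stepB [[]]).map String.ofList
  have h0 : toks.foldl stepB [[]] = PySem.Set.ofList (toks.foldl pstep [[]]) :=
    foldTok toks [[]]
  rw [h0, ofList_map_ofListChar]
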